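-- pv_equiv track=rewrite | github.com/d4egon/maia0.3 | core/emotion_fusion_engine.py | _map_prediction_to_emotion
-- ===== SOURCE A (Python) =====
-- def _map_prediction_to_emotion(prediction: str) -> str:
--     """
--     Map a prediction label to a more generic emotion if possible.
--
--     :param prediction: The label predicted by the visual model.
--     :return: A mapped emotion or the prediction if no mapping exists.
--     """
--     emotion_map = {
--         "happy": ["smile", "happiness"],
--         "sad": ["sadness", "frown"],
--         "angry": ["anger", "furious"],
--         "fearful": ["fear", "scared"],
--         "surprised": ["surprise", "astonished"],
--         "neutral": ["neutral", "calm"]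
--     }
--     for emotion, keywords in emotion_map.items():
--         if prediction.lower() in keywords:
--             return emotion
--     return "neutral"  # If no match, return neutral
-- ===== SOURCE B (Python) =====
-- # Sorted flat (keyword, emotion) table, searched by binary search instead of
-- # scanning per-emotion keyword lists.
-- _SORTED_TABLE = [
--     ("anger", "angry"),
--     ("astonished", "surprised"),
--     ("calm", "neutral"),
--     ("fear", "fearful"),
--     ("frown", "sad"),
--     ("furious", "angry"),
--     ("happiness", "happy"),
--     ("neutral", "neutral"),
--     ("sadness", "sad"),
--     ("scared", "fearful"),
--     ("smile", "happy"),
--     ("surprise", "surprised"),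
-- ]
--
-- def _map_prediction_to_emotion(prediction: str) -> str:
--     p = prediction.lower()
--     lo, hi = 0, len(_SORTED_TABLE)
--     while lo < hi:
--         mid = (lo + hi) // 2
--         key, emotion = _SORTED_TABLE[mid]
--         if key == p:
--             return emotion
--         if key < p:
--             lo = mid + 1
--         else:
--             hi = mid
--     return "neutral"
-- ===== Notes on version B (the rewrite author's own statement) =====
-- stated objective: alternative
-- what changed: Replaces the per-call scan over emotion->keyword-list pairs with binary search over a flat (keyword, emotion) table sorted by keyword, returning the default emotion when the search interval empties.
import Mathlib
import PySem

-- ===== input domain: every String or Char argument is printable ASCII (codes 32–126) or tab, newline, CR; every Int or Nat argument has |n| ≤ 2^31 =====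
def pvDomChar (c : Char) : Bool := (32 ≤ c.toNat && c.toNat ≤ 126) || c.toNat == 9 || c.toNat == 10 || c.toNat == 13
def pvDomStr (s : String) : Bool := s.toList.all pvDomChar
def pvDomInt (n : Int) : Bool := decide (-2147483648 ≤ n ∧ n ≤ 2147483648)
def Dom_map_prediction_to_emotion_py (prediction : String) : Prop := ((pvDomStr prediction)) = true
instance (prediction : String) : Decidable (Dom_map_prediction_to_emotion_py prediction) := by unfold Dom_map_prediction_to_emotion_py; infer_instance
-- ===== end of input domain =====

-- B replaces A's per-call scan over emotion→keyword lists with binary search over a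
-- sorted flat (keyword, emotion) table (alternative algorithm; return-value equivalence proved below).


-- ===== PORT A =====
-- for-loop with early return over emotion_map.items(), transliterated as structural recursion
def pvEmotionMap : List (String × List String) :=
  [("happy", ["smile", "happiness"]),
   ("sad", ["sadness", "frown"]),
   ("angry", ["anger", "furious"]),
   ("fearful", ["fear", "scared"]),
   ("surprised", ["surprise", "astonished"]),
   ("neutral", ["neutral", "calm"])]

def pvLoopA (p : String) : List (String × List String) → String
  | [] => "neutral"
  | (emotion, keywords) :: rest =>
      if keywords.contains p then emotion else pvLoopA p rest

def map_prediction_to_emotion_py (prediction : String) : String :=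
  pvLoopA (PySem.Str.lower prediction) pvEmotionMap

-- ===== PORT B =====
-- sorted flat (keyword, emotion) table
def pvSortedTable : List (String × String) :=
  [("anger", "angry"),
   ("astonished", "surprised"),
   ("calm", "neutral"),
   ("fear", "fearful"),
   ("frown", "sad"),
   ("furious", "angry"),
   ("happiness", "happy"),
   ("neutral", "neutral"),
   ("sadness", "sad"),
   ("scared", "fearful"),
   ("smile", "happy"),
   ("surprise", "surprised")]

-- Source B's while-loop, transliterated; the fuel argument only makes the loop total
-- (hi - lo shrinks each step, so fuel = table length always suffices)
def pvBS (p : String) : Nat → Nat → Nat → String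
  | 0, _, _ => "neutral"
  | fuel + 1, lo, hi =>
    if lo < hi then
      let mid := (lo + hi) / 2
      let ke := pvSortedTable.getD mid ("", "")
      if ke.1 == p then ke.2
      -- Python's 'key < p' is code-point lexicographic; ported as List Char '<'
      -- (exact: String.lt_iff_toList_lt)
      else if ke.1.toList < p.toList then pvBS p fuel (mid + 1) hi
      else pvBS p fuel lo mid
    else "neutral"

def map_prediction_to_emotion_py_alt (prediction : String) : String :=
  pvBS (PySem.Str.lower prediction) pvSortedTable.length 0 pvSortedTable.length

-- ===== PRECONDITION & SPEC =====
def Spec_map_prediction_to_emotion_py (prediction : String) (out : String) : Prop := out = map_prediction_to_emotion_py_alt prediction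
instance (prediction : String) (out : String) : Decidable (Spec_map_prediction_to_emotion_py prediction out) := by unfold Spec_map_prediction_to_emotion_py; infer_instance

-- ===== CLAIM (what is proved, stated in full; the proofs are below) =====
def Claim_equal_map_prediction_to_emotion_py : Prop := ∀ (prediction : String), Dom_map_prediction_to_emotion_py prediction → Spec_map_prediction_to_emotion_py prediction (map_prediction_to_emotion_py prediction)

-- ===== LEMMAS AND PROOFS =====

-- binary search over a table none of whose keys equals p returns "neutral"
lemma pvBS_miss (p : String) (hp : ∀ i, i < 12 → (pvSortedTable.getD i ("", "")).1 ≠ p) :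
    ∀ fuel lo hi, hi ≤ 12 → pvBS p fuel lo hi = "neutral" := by
  intro fuel
  induction fuel with
  | zero => intro lo hi _; rfl
  | succ n ih =>
      intro lo hi h12
      rw [pvBS]
      split_ifs with h
      · have hmid : (lo + hi) / 2 < 12 := by omega
        have hne := hp _ hmid
        simp only [beq_iff_eq]
        rw [if_neg hne]
        split_ifs with hlt
        · exact ih _ _ h12
        · exact ih _ _ (by omega)
      · rfl

lemma pvMain (s : String) : pvLoopA s pvEmotionMap = pvBS s pvSortedTable.length 0 pvSortedTable.length := by
  by_cases h1 : s = "anger";       · subst h1; decide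
  by_cases h2 : s = "astonished";  · subst h2; decide
  by_cases h3 : s = "calm";        · subst h3; decide
  by_cases h4 : s = "fear";        · subst h4; decide
  by_cases h5 : s = "frown";       · subst h5; decide
  by_cases h6 : s = "furious";     · subst h6; decide
  by_cases h7 : s = "happiness";   · subst h7; decide
  by_cases h8 : s = "neutral";     · subst h8; decide
  by_cases h9 : s = "sadness";     · subst h9; decide
  by_cases h10 : s = "scared";     · subst h10; decide
  by_cases h11 : s = "smile";      · subst h11; decide
  by_cases h12 : s = "surprise";   · subst h12; decide
  -- s matches no keyword: both sides return "neutral"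
  have hB : pvBS s pvSortedTable.length 0 pvSortedTable.length = "neutral" := by
    apply pvBS_miss s _ pvSortedTable.length 0 pvSortedTable.length (by decide)
    intro i hi
    interval_cases i <;> simp only [pvSortedTable, List.getD] <;> simp <;>
      first
        | exact fun h => h1 h.symm | exact fun h => h2 h.symm
        | exact fun h => h3 h.symm | exact fun h => h4 h.symm
        | exact fun h => h5 h.symm | exact fun h => h6 h.symm
        | exact fun h => h7 h.symm | exact fun h => h8 h.symm
        | exact fun h => h9 h.symm | exact fun h => h10 h.symm
        | exact fun h => h11 h.symm | exact fun h => h12 h.symm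
  rw [hB]
  simp only [pvLoopA, pvEmotionMap, List.contains_cons, List.contains_nil,
    Bool.or_false, Bool.or_eq_true, beq_iff_eq]
  split_ifs <;> simp_all

-- ===== VERDICT (by name: the statement is the Claim_ definition above) =====
theorem map_prediction_to_emotion_py_spec : Claim_equal_map_prediction_to_emotion_py := by
  intro p _
  show _ = _
  simp [map_prediction_to_emotion_py, map_prediction_to_emotion_py_alt, pvMain]
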